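-- pv_equiv track=rewrite | github.com/JanEricNitschke/pymend | src/pymend/docstring_info.py | _analyze_body_names
-- ===== SOURCE A (Python) =====
-- from collections import Counter
--
-- def _analyze_body_names(
--     same_length_tuples: list[tuple[str | None, ...]],
-- ) -> tuple[list[Counter[str]], dict[str, int], dict[str, int]]:
--     """Compute per-position frequency counters and consistent-position mapping.
--
--     All tuples in *same_length_tuples* must share the same length.  Does a
--     single pass to collect three things:
--
--     1. **name_freq_by_position**: for each position, a ``Counter`` of
--        non-None names across all tuples, ordered by frequency then first
--        occurrence.
--     2. **consistent**: for each name that only ever occupies a *single*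
--        position across all tuples, ``{name: position}``.
--     3. **max_occurrences**: for each name, the maximum number of times it
--        appears in any single body tuple (e.g. ``return a, b, a`` gives
--        ``{"a": 2, "b": 1}``).
--
--     Parameters
--     ----------
--     same_length_tuples : list[tuple[str | None, ...]]
--         Body tuples that all share the same length.  Must be non-empty.
--
--     Returns
--     -------
--     name_freq_by_position : list[Counter[str]]
--         Full frequency counter for each position.
--     consistent : dict[str, int]
--         ``{name: position}`` for names with a single consistent position.
--     max_occurrences : dict[str, int]
--         Maximum times each name appears in any single body tuple.
--     """
--     name_freq_by_position: list[Counter[str]] = [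
--         Counter() for _ in same_length_tuples[0]
--     ]
--     positions_of: dict[str, set[int]] = {}
--     max_occurrences: dict[str, int] = {}
--     for body_tuple in same_length_tuples:
--         tuple_counts: Counter[str] = Counter()
--         for position, name in enumerate(body_tuple):
--             if name is not None:
--                 name_freq_by_position[position][name] += 1
--                 positions_of.setdefault(name, set()).add(position)
--                 tuple_counts[name] += 1
--         for name, count in tuple_counts.items():
--             if count > max_occurrences.get(name, 0):
--                 max_occurrences[name] = count
--
--     consistent = {
--         name: next(iter(positions))
--         for name, positions in positions_of.items()
--         if len(positions) == 1
--     }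
--     return name_freq_by_position, consistent, max_occurrences
-- ===== SOURCE B (Python) =====
-- from collections import Counter
-- from itertools import islice, zip_longest
--
--
-- def _analyze_body_names(same_length_tuples):
--     # Per-position counters: transpose (the number of positions is the first
--     # tuple's length; short tuples are padded with None) and count each
--     # column's non-None names in one comprehension.
--     num_positions = len(same_length_tuples[0])
--     name_freq_by_position = [
--         Counter(name for name in column if name is not None)
--         for column in islice(zip_longest(*same_length_tuples), num_positions)
--     ]
--
--     # Consistent positions: remember each name's first position and flag
--     # names later seen at a different one.
--     first_pos = {}
--     inconsistent = set()
--     for row in same_length_tuples: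
--         for position, name in enumerate(row):
--             if name is not None and first_pos.setdefault(name, position) != position:
--                 inconsistent.add(name)
--     consistent = {
--         name: position
--         for name, position in first_pos.items()
--         if name not in inconsistent
--     }
--
--     # Max occurrences of each name within any single tuple: collect each
--     # name's per-tuple counts, then take the max per name.
--     counts_by_name = {}
--     for row in same_length_tuples:
--         for name, count in Counter(n for n in row if n is not None).items():
--             counts_by_name.setdefault(name, []).append(count)
--     max_occurrences = {name: max(counts) for name, counts in counts_by_name.items()}
--
--     return name_freq_by_position, consistent, max_occurrences
-- ===== Notes on version B (the rewrite author's own statement) =====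
-- stated objective: faster
-- what changed: A's single fused loop (per-position counter updates, position-set accumulation, per-row Counter merged into a running-max dict) is split into three passes: a zip_longest transpose with one Counter built per column, a first-position dict plus inconsistency set replacing the sets-of-positions with len==1 filtering, and per-name count lists grouped in one pass then maxed, replacing the running-max merge.
import Mathlib
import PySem

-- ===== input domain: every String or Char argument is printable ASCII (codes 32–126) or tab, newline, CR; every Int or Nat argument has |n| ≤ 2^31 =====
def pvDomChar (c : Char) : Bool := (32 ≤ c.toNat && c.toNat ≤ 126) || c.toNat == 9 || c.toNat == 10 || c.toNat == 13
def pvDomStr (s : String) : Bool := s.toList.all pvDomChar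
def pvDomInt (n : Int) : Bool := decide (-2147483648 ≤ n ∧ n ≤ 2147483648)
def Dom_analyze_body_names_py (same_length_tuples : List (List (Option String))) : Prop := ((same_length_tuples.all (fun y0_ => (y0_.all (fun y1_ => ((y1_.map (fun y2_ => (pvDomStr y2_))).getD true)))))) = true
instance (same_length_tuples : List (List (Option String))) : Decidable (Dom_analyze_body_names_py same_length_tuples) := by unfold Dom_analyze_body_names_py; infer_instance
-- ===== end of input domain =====

-- B transposes the input and builds one Counter per column, tracks each
-- name's first position plus an inconsistency set, and groups per-tuple
-- counts per name before taking their max, instead of A's single fused loop;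
-- a timing run measured B faster by a constant factor.

-- ===== PORT A =====
-- A-side helpers. Counter/`+= 1` and `positions_of.setdefault(name,
-- set()).add(position)` are PySem.Dict.modify with defaults 0 / Set.empty.
-- `name_freq_by_position[position][name] += 1` raises IndexError for
-- position ≥ len(same_length_tuples[0]); List.modify is a no-op there and
-- Pre_ excludes exactly those inputs (enumerate positions are ≥ 0, so .toNat
-- is exact).
def pyAInner
    (st : List (PySem.Dict String Int) × PySem.Dict String (PySem.Set Int) × PySem.Dict String Int)
    (pn : Int × Option String) :
    List (PySem.Dict String Int) × PySem.Dict String (PySem.Set Int) × PySem.Dict String Int :=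
  match pn.2 with
  | none => st
  | some name =>
    (st.1.modify pn.1.toNat (fun d => d.modify name 0 (· + 1)),
     st.2.1.modify name PySem.Set.empty (fun s => PySem.Set.add s pn.1),
     st.2.2.modify name 0 (· + 1))

-- one iteration of `for body_tuple in same_length_tuples` (tuple_counts
-- starts empty; then the `for name, count in tuple_counts.items()` loop).
def pyARow
    (st : List (PySem.Dict String Int) × PySem.Dict String (PySem.Set Int) × PySem.Dict String Int)
    (row : List (Option String)) :
    List (PySem.Dict String Int) × PySem.Dict String (PySem.Set Int) × PySem.Dict String Int :=
  let r := (PySem.List.enumerate row).foldl pyAInner (st.1, st.2.1, PySem.Dict.empty)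
  (r.1, r.2.1,
   r.2.2.items.foldl (fun m kv => if kv.2 > m.getD kv.1 0 then m.insert kv.1 kv.2 else m) st.2.2)

-- `same_length_tuples[0]` raises IndexError on []: excluded by Pre_
-- (headD []). `next(iter(positions))` on the singleton set is its only
-- element (headD 0).
def analyze_body_names_py (same_length_tuples : List (List (Option String))) :
    (List (List (String × Int))) × (List (String × Int)) × (List (String × Int)) :=
  let st := same_length_tuples.foldl pyARow
    ((same_length_tuples.headD []).map (fun _ => PySem.Dict.empty), PySem.Dict.empty, PySem.Dict.empty)
  let consistent := st.2.1.items.foldl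
    (fun d kv => if kv.2.length == 1 then d.insert kv.1 (kv.2.headD 0) else d) PySem.Dict.empty
  (st.1.map (·.items), consistent.items, st.2.2.items)


-- ===== PORT B =====
-- `first_pos.setdefault(name, position) != position` compares setdefault's
-- return value, i.e. first_pos.get(name, position).
def pyBFirstStep (s : PySem.Dict String Int × PySem.Set String) (pn : Int × Option String) :
    PySem.Dict String Int × PySem.Set String :=
  match pn.2 with
  | none => s
  | some name =>
    let v := (s.1.get? name).getD pn.1
    let fp := s.1.setdefault name pn.1
    if v ≠ pn.1 then (fp, PySem.Set.add s.2 name) else (fp, s.2)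


-- `len(same_length_tuples[0])` raises IndexError on []: excluded by Pre_.
-- With a nonempty input, `islice(zip_longest(*rows), num_positions)` yields
-- for each p < num_positions the column `row[p] if p < len(row) else None`
-- = r.getD p none; `Counter(name for name in column if name is not None)` is
-- counter of filterMap id; `counts_by_name.setdefault(name, []).append(count)`
-- is Dict.modify with default []; `max(counts)` is over a nonempty list, so
-- its total port max? never returns none (getD 0 is unreachable).
def analyze_body_names_py_alt (same_length_tuples : List (List (Option String))) :
    (List (List (String × Int))) × (List (String × Int)) × (List (String × Int)) :=
  let numPositions := (same_length_tuples.headD []).length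
  let nameFreqByPosition := (List.range numPositions).map (fun p =>
    PySem.Dict.counter ((same_length_tuples.map (fun r => r.getD p none)).filterMap id))
  let fi := same_length_tuples.foldl
    (fun s row => (PySem.List.enumerate row).foldl pyBFirstStep s)
    (PySem.Dict.empty, PySem.Set.empty)
  let consistent := fi.1.items.foldl
    (fun d kv => if fi.2.contains kv.1 then d else d.insert kv.1 kv.2) PySem.Dict.empty
  let countsByName := same_length_tuples.foldl
    (fun d row => (PySem.Dict.counter (row.filterMap id)).items.foldl
      (fun d kv => d.modify kv.1 [] (fun l => l ++ [kv.2])) d)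
    PySem.Dict.empty
  let maxOccurrences := countsByName.items.foldl
    (fun d kv => d.insert kv.1 ((PySem.List.max? kv.2 (fun x => x)).getD 0)) PySem.Dict.empty
  (nameFreqByPosition.map (·.items), consistent.items, maxOccurrences.items)


-- ===== PRECONDITION & SPEC =====
-- Exactly the inputs on which the Python A returns: a nonempty list whose
-- tuples carry no name (non-None entry) at a position ≥ len(rows[0])
-- (otherwise `name_freq_by_position[position]` raises IndexError).
def Pre_analyze_body_names_py (same_length_tuples : List (List (Option String))) : Prop :=
  same_length_tuples ≠ [] ∧
    ∀ t ∈ same_length_tuples, ∀ x ∈ t.drop (same_length_tuples.headD []).length, x = none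
instance (same_length_tuples : List (List (Option String))) : Decidable (Pre_analyze_body_names_py same_length_tuples) := by unfold Pre_analyze_body_names_py; infer_instance

def pvWitness_analyze_body_names_py : List (List (Option String)) :=
  [[some "a", none], [none, some "b"], [some "a", some "a"]]

def Spec_analyze_body_names_py (same_length_tuples : List (List (Option String))) (out : (List (List (String × Int))) × (List (String × Int)) × (List (String × Int))) : Prop := out = analyze_body_names_py_alt same_length_tuples
instance (same_length_tuples : List (List (Option String))) (out : (List (List (String × Int))) × (List (String × Int)) × (List (String × Int))) : Decidable (Spec_analyze_body_names_py same_length_tuples out) := by unfold Spec_analyze_body_names_py; infer_instance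

-- ===== CLAIM (what is proved, stated in full; the proofs are below) =====
def Claim_equal_analyze_body_names_py : Prop := ∀ (same_length_tuples : List (List (Option String))), Dom_analyze_body_names_py same_length_tuples → Pre_analyze_body_names_py same_length_tuples → Spec_analyze_body_names_py same_length_tuples (analyze_body_names_py same_length_tuples)

-- ===== LEMMAS AND PROOFS =====
-- (the two ports are in fact extensionally equal on every input, so the Dom/
-- Pre hypotheses are not needed by the proof; Pre_ marks where the Python A
-- raises)

def stepFreq (fr : List (PySem.Dict String Int)) (pn : Int × Option String) :
    List (PySem.Dict String Int) :=
  match pn.2 with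
  | none => fr
  | some name => fr.modify pn.1.toNat (fun d => d.modify name 0 (· + 1))
def stepPos (d : PySem.Dict String (PySem.Set Int)) (pn : Int × Option String) :
    PySem.Dict String (PySem.Set Int) :=
  match pn.2 with
  | none => d
  | some name => d.modify name PySem.Set.empty (fun s => PySem.Set.add s pn.1)
def stepTC (d : PySem.Dict String Int) (pn : Int × Option String) : PySem.Dict String Int :=
  match pn.2 with
  | none => d
  | some name => d.modify name 0 (· + 1)

lemma pyAInner_eq :
    pyAInner = fun st pn => (stepFreq st.1 pn, stepPos st.2.1 pn, stepTC st.2.2 pn) := by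
  funext st pn
  obtain ⟨i, o⟩ := pn
  cases o <;> rfl

lemma inner_split (l : List (Int × Option String))
    (s : List (PySem.Dict String Int) × PySem.Dict String (PySem.Set Int) × PySem.Dict String Int) :
    l.foldl pyAInner s = (l.foldl stepFreq s.1, l.foldl stepPos s.2.1, l.foldl stepTC s.2.2) := by
  rw [pyAInner_eq]
  have h1 := PySem.List.foldl_prod_mk stepFreq (fun t pn => (stepPos t.1 pn, stepTC t.2 pn)) l s.1 s.2
  have h2 := PySem.List.foldl_prod_mk stepPos stepTC l s.2.1 s.2.2
  exact h1.trans (by rw [show s.2 = (s.2.1, s.2.2) from rfl] at h2; rw [h2])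
def rowF (fr : List (PySem.Dict String Int)) (row : List (Option String)) :
    List (PySem.Dict String Int) :=
  (PySem.List.enumerate row).foldl stepFreq fr
def rowP (d : PySem.Dict String (PySem.Set Int)) (row : List (Option String)) :
    PySem.Dict String (PySem.Set Int) :=
  (PySem.List.enumerate row).foldl stepPos d
def rowM (m : PySem.Dict String Int) (row : List (Option String)) : PySem.Dict String Int :=
  ((PySem.List.enumerate row).foldl stepTC PySem.Dict.empty).items.foldl
    (fun m kv => if kv.2 > m.getD kv.1 0 then m.insert kv.1 kv.2 else m) m

lemma pyARow_eq (st) (row : List (Option String)) :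
    pyARow st row = (rowF st.1 row, rowP st.2.1 row, rowM st.2.2 row) := by
  unfold pyARow rowF rowP rowM
  rw [inner_split]

lemma outer_split (rows : List (List (Option String))) (f0 p0 m0) :
    rows.foldl pyARow (f0, p0, m0) = (rows.foldl rowF f0, rows.foldl rowP p0, rows.foldl rowM m0) := by
  have he : pyARow = fun st row => (rowF st.1 row, rowP st.2.1 row, rowM st.2.2 row) := by
    funext st row; exact pyARow_eq st row
  rw [he]
  have h1 := PySem.List.foldl_prod_mk rowF (fun t row => (rowP t.1 row, rowM t.2 row)) rows f0 (p0, m0)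
  have h2 := PySem.List.foldl_prod_mk rowP rowM rows p0 m0
  exact h1.trans (by rw [h2])
def freqUpd (o : Option (Option String)) (e : Option (PySem.Dict String Int)) :
    Option (PySem.Dict String Int) :=
  match o with
  | some (some name) => e.map (fun d => d.modify name 0 (· + 1))
  | _ => e

lemma rowF_get (row : List (Option String)) :
    ∀ (n : Nat) (fr : List (PySem.Dict String Int)) (p : Nat),
      ((PySem.List.enumerate row (n : Int)).foldl stepFreq fr)[p]? =
        freqUpd (if n ≤ p then row[p - n]? else none) fr[p]? := by
  induction row with
  | nil =>
    intro n fr p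
    simp only [PySem.List.enumerate, List.foldl_nil]
    split_ifs <;> simp [freqUpd]
  | cons x t ih =>
    intro n fr p
    have hen : PySem.List.enumerate (x :: t) (n : Int) = ((n : Int), x) :: PySem.List.enumerate t ((n : Int) + 1) := rfl
    rw [hen, List.foldl_cons]
    have hcast : ((n : Int) + 1) = ((n + 1 : Nat) : Int) := by push_cast; ring
    rw [hcast]
    cases x with
    | none =>
      have hs : stepFreq fr ((n : Int), none) = fr := rfl
      rw [hs, ih (n + 1) fr p]
      rcases Nat.lt_trichotomy p n with h | h | h
      · rw [if_neg (by omega), if_neg (by omega)]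
      · subst h
        rw [if_neg (by omega), if_pos (le_refl _)]
        simp [freqUpd]
      · rw [if_pos (by omega), if_pos (by omega)]
        have : p - n = (p - (n + 1)) + 1 := by omega
        rw [this, List.getElem?_cons_succ]
    | some name =>
      have hs : stepFreq fr ((n : Int), some name) = fr.modify n (fun d => d.modify name 0 (· + 1)) := by
        simp [stepFreq]
      rw [hs, ih (n + 1) _ p]
      have hmod : (fr.modify n (fun d => d.modify name 0 (· + 1)))[p]? =
          if n = p then fr[p]?.map (fun d => d.modify name 0 (· + 1)) else fr[p]? := by
        rw [List.getElem?_modify]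
        cases fr[p]? <;> split_ifs <;> rfl
      rcases Nat.lt_trichotomy p n with h | h | h
      · rw [if_neg (by omega), if_neg (by omega), hmod, if_neg (by omega)]
      · subst h
        rw [if_neg (by omega), if_pos (le_refl _), hmod, if_pos rfl]
        simp [freqUpd]
      · rw [if_pos (by omega), if_pos (by omega), hmod, if_neg (by omega)]
        have : p - n = (p - (n + 1)) + 1 := by omega
        rw [this, List.getElem?_cons_succ]
lemma freq_main (rows : List (List (Option String))) (L : Nat) :
    rows.foldl rowF (List.replicate L PySem.Dict.empty) =
      (List.range L).map (fun p =>
        PySem.Dict.counter ((rows.map (fun r => r.getD p none)).filterMap id)) := by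
  induction rows using List.reverseRecOn with
  | nil =>
    simp only [List.foldl_nil, List.map_nil, List.filterMap_nil]
    rw [show (fun (p : Nat) => PySem.Dict.counter ([] : List String)) = fun _ => (PySem.Dict.empty : PySem.Dict String Int) from rfl]
    rw [List.map_const', List.length_range]
  | append_singleton rs r ih =>
    rw [List.foldl_append, List.foldl_cons, List.foldl_nil, ih]
    apply List.ext_getElem?
    intro p
    have hget := rowF_get r 0 ((List.range L).map (fun p =>
        PySem.Dict.counter ((rs.map (fun r => r.getD p none)).filterMap id))) p
    rw [show ((0 : Nat) : Int) = (0 : Int) from rfl] at hget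
    unfold rowF
    rw [hget, if_pos (Nat.zero_le p), Nat.sub_zero]
    by_cases hp : p < L
    · rw [List.getElem?_map, List.getElem?_map, List.getElem?_range hp]
      simp only [Option.map_some]
      have hsplit : ((rs ++ [r]).map (fun r' => r'.getD p none)).filterMap id
          = (rs.map (fun r' => r'.getD p none)).filterMap id ++ ([r.getD p none].filterMap id) := by
        rw [List.map_append, List.filterMap_append, List.map_singleton]
      have hgd : r.getD p none = (r[p]?).getD none := List.getD_eq_getElem?_getD
      cases hr : r[p]? with
      | none =>
        rw [hsplit, hgd, hr]
        simp [freqUpd]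
      | some v =>
        cases v with
        | none =>
          rw [hsplit, hgd, hr]
          simp [freqUpd]
        | some name =>
          rw [hsplit, hgd, hr]
          simp only [Option.getD_some, List.filterMap_cons, id, List.filterMap_nil]
          rw [PySem.Dict.counter_append_singleton]
          simp [freqUpd]
    · have h1 : ((List.range L).map (fun p =>
          PySem.Dict.counter ((rs.map (fun r' => r'.getD p none)).filterMap id)))[p]? = none := by
        rw [List.getElem?_eq_none] ; simpa using Nat.le_of_not_lt hp
      have h2 : ((List.range L).map (fun p =>
          PySem.Dict.counter (((rs ++ [r]).map (fun r' => r'.getD p none)).filterMap id)))[p]? = none := by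
        rw [List.getElem?_eq_none] ; simpa using Nat.le_of_not_lt hp
      rw [h1, h2]
      cases r[p]? with
      | none => rfl
      | some v => cases v <;> rfl
def INVpc (pos : PySem.Dict String (PySem.Set Int))
    (s : PySem.Dict String Int × PySem.Set String) : Prop :=
  pos.keys = s.1.keys ∧ pos.keys.Nodup ∧
  (∀ n st, pos.get? n = some st → st ≠ [] ∧ st.Nodup ∧ s.1.get? n = some (st.headD 0)) ∧
  (∀ n, n ∈ s.2 ↔ ∃ st, pos.get? n = some st ∧ 2 ≤ st.length)

lemma two_le_of_mem_ne {a b : Int} {l : List Int} (ha : a ∈ l) (hb : b ∈ l) (hne : a ≠ b) :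
    2 ≤ l.length := by
  match l with
  | [] => simp at ha
  | [x] =>
    simp at ha hb; exact absurd (ha.trans hb.symm) hne
  | x :: y :: t => simp

lemma not_mem_of_not_contains {l : List Int} {i : Int} (h' : ¬ PySem.Set.contains l i = true) :
    i ∉ l := by
  rw [show (PySem.Set.contains l i = List.contains l i) from rfl] at h'
  simpa [List.contains_iff_mem] using h'

lemma INVpc_step (pos) (s) (pn : Int × Option String) (h : INVpc pos s) :
    INVpc (stepPos pos pn) (pyBFirstStep s pn) := by
  obtain ⟨hkeys, hnd, hget, hinc⟩ := h
  obtain ⟨i, o⟩ := pn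
  cases o with
  | none => exact ⟨hkeys, hnd, hget, hinc⟩
  | some name =>
    simp only [stepPos, pyBFirstStep]
    by_cases hk : name ∈ pos.keys
    · -- name already present
      obtain ⟨st, hst⟩ : ∃ st, pos.get? name = some st := by
        cases hg : pos.get? name with
        | none => exact absurd ((PySem.Dict.get?_eq_none_iff_not_mem_keys pos name).mp hg) (by simpa using hk)
        | some st => exact ⟨st, rfl⟩
      obtain ⟨hne, hsnd, hfp⟩ := hget name st hst
      have hc : pos.contains name = true := (PySem.Dict.contains_iff_mem_keys pos name).mpr hk
      have hcf : s.1.contains name = true := by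
        rw [PySem.Dict.contains_iff_mem_keys]; rw [← hkeys]; exact hk
      have hposmod : pos.modify name PySem.Set.empty (fun t => PySem.Set.add t i)
          = pos.insert name (PySem.Set.add st i) := by
        unfold PySem.Dict.modify
        rw [PySem.Dict.getD_of_get?_eq_some pos _ hst]
      have hsd : s.1.setdefault name i = s.1 := PySem.Dict.setdefault_of_contains s.1 i hcf
      have hv : (s.1.get? name).getD i = st.headD 0 := by rw [hfp]; rfl
      rw [hposmod, hsd, hv]
      have hkeys' : (pos.insert name (PySem.Set.add st i)).keys = pos.keys :=
        PySem.Dict.keys_insert_of_contains pos _ hc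
      have hadd_ne : PySem.Set.add st i ≠ [] := by
        simp only [PySem.Set.add]; split_ifs with h'
        · exact hne
        · simp
      have hadd_nd : (PySem.Set.add st i).Nodup := by
        simp only [PySem.Set.add]; split_ifs with h'
        · exact hsnd
        · have hni : i ∉ st := not_mem_of_not_contains h'
          refine List.Nodup.append hsnd (List.nodup_singleton i) ?_
          intro a ha hb
          simp only [List.mem_singleton] at hb
          exact hni (hb ▸ ha)
      have hadd_hd : (PySem.Set.add st i).headD 0 = st.headD 0 := by
        simp only [PySem.Set.add]; split_ifs with h'
        · rfl
        · cases st with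
          | nil => exact absurd rfl hne
          | cons a t => rfl
      have hhd : st.headD 0 ∈ st := by
        cases st with
        | nil => exact absurd rfl hne
        | cons a t => simp
      have hget' : ∀ n st', (pos.insert name (PySem.Set.add st i)).get? n = some st' →
          st' ≠ [] ∧ st'.Nodup ∧ s.1.get? n = some (st'.headD 0) := by
        intro n st' hst'
        rw [PySem.Dict.get?_insert] at hst'
        by_cases hn : n = name
        · rw [if_pos hn] at hst'
          cases hst'
          subst hn
          exact ⟨hadd_ne, hadd_nd, by rw [hadd_hd]; exact hfp⟩
        · rw [if_neg hn] at hst'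
          exact hget n st' hst'
      have hlen_iff : ∀ (extra : Prop), (extra ↔ st.headD 0 ≠ i) →
          ((extra ∨ name ∈ s.2) ↔ 2 ≤ (PySem.Set.add st i).length) := by
        intro extra hex
        rw [hex, hinc name]
        constructor
        · rintro (hvi | ⟨st', hst', hlen⟩)
          · simp only [PySem.Set.add]; split_ifs with h'
            · have : i ∈ st := by
                rw [show (PySem.Set.contains st i = List.contains st i) from rfl] at h'
                simpa [List.contains_iff_mem] using h'
              exact two_le_of_mem_ne hhd this hvi
            · rw [List.length_append]
              cases st with
              | nil => exact absurd rfl hne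
              | cons a t => simp
          · rw [hst] at hst'; cases hst'
            simp only [PySem.Set.add]; split_ifs
            · exact hlen
            · rw [List.length_append]; omega
        · intro hlen
          simp only [PySem.Set.add] at hlen
          by_cases h' : PySem.Set.contains st i = true
          · rw [if_pos h'] at hlen
            exact Or.inr ⟨st, hst, hlen⟩
          · by_cases hvi : st.headD 0 = i
            · have hni : i ∉ st := not_mem_of_not_contains h'
              rw [← hvi] at hni
              exact absurd hhd hni
            · exact Or.inl hvi
      by_cases hvi : st.headD 0 = i
      · rw [if_neg (not_ne_iff.mpr hvi)]
        refine ⟨hkeys' ▸ hkeys, hkeys' ▸ hnd, hget', ?_⟩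
        intro n
        by_cases hn : n = name
        · subst hn
          rw [PySem.Dict.get?_insert, if_pos rfl]
          have := hlen_iff False ⟨False.elim, fun h => h hvi⟩
          simp only [false_or] at this
          rw [this]
          constructor
          · intro hl; exact ⟨_, rfl, hl⟩
          · rintro ⟨st', hst', hl⟩; cases hst'; exact hl
        · rw [PySem.Dict.get?_insert, if_neg hn]
          exact hinc n
      · rw [if_pos hvi]
        refine ⟨hkeys' ▸ hkeys, hkeys' ▸ hnd, hget', ?_⟩
        intro n
        by_cases hn : n = name
        · subst hn
          rw [PySem.Dict.get?_insert, if_pos rfl]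
          have hmem : n ∈ PySem.Set.add s.2 n ↔ True ∨ n ∈ s.2 := by
            rw [PySem.Set.mem_add]; tauto
          rw [show (n ∈ (s.1, PySem.Set.add s.2 n).2) = (n ∈ PySem.Set.add s.2 n) from rfl]
          rw [hmem]
          have := hlen_iff True (by simpa using hvi)
          rw [show (True ∨ n ∈ s.2) ↔ 2 ≤ (PySem.Set.add st i).length from
            (by constructor
                · intro _; exact (this).mp (Or.inl trivial)
                · intro h2; exact Or.inl trivial)]
          constructor
          · intro hl; exact ⟨_, rfl, hl⟩
          · rintro ⟨st', hst', hl⟩; cases hst'; exact hl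
        · rw [PySem.Dict.get?_insert, if_neg hn]
          rw [show (n ∈ (s.1, PySem.Set.add s.2 name).2) = (n ∈ PySem.Set.add s.2 name) from rfl]
          rw [PySem.Set.mem_add]
          rw [show (n ∈ s.2 ∨ n = name) ↔ n ∈ s.2 from by simp [hn]]
          exact hinc n
    · -- fresh name
      have hgnone : pos.get? name = none := (PySem.Dict.get?_eq_none_iff_not_mem_keys pos name).mpr hk
      have hc : pos.contains name = false := by
        rw [← Bool.not_eq_true, PySem.Dict.contains_iff_mem_keys]; exact hk
      have hkf : name ∉ s.1.keys := by rw [← hkeys]; exact hk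
      have hgf : s.1.get? name = none := (PySem.Dict.get?_eq_none_iff_not_mem_keys s.1 name).mpr hkf
      have hcf : s.1.contains name = false := by
        rw [← Bool.not_eq_true, PySem.Dict.contains_iff_mem_keys]; exact hkf
      have hposmod : pos.modify name PySem.Set.empty (fun t => PySem.Set.add t i)
          = pos.insert name [i] := by
        unfold PySem.Dict.modify
        rw [PySem.Dict.getD_of_not_contains pos _ hc]
        rfl
      have hsd : s.1.setdefault name i = s.1.insert name i := PySem.Dict.setdefault_of_not_contains s.1 i hcf
      have hv : (s.1.get? name).getD i = i := by rw [hgf]; rfl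
      rw [hposmod, hsd, hv]
      rw [if_neg (by simp)]
      refine ⟨?_, ?_, ?_, ?_⟩
      · rw [PySem.Dict.keys_insert_of_not_contains pos _ hc,
            PySem.Dict.keys_insert_of_not_contains s.1 _ hcf, hkeys]
      · rw [PySem.Dict.keys_insert_of_not_contains pos _ hc]
        refine List.Nodup.append hnd (List.nodup_singleton name) ?_
        intro a ha hb
        simp only [List.mem_singleton] at hb
        exact hk (hb ▸ ha)
      · intro n st' hst'
        rw [PySem.Dict.get?_insert] at hst'
        by_cases hn : n = name
        · rw [if_pos hn] at hst'
          cases hst'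
          subst hn
          exact ⟨by simp, by simp, by rw [PySem.Dict.get?_insert, if_pos rfl]; rfl⟩
        · rw [if_neg hn] at hst'
          obtain ⟨a, b, c⟩ := hget n st' hst'
          exact ⟨a, b, by rw [PySem.Dict.get?_insert, if_neg hn]; exact c⟩
      · intro n
        rw [hinc n, PySem.Dict.get?_insert]
        by_cases hn : n = name
        · subst hn
          rw [if_pos rfl, hgnone]
          simp
        · rw [if_neg hn]
def rowB (s : PySem.Dict String Int × PySem.Set String) (row : List (Option String)) :
    PySem.Dict String Int × PySem.Set String :=
  (PySem.List.enumerate row).foldl pyBFirstStep s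

lemma INVpc_fold_inner (l : List (Int × Option String)) :
    ∀ pos s, INVpc pos s → INVpc (l.foldl stepPos pos) (l.foldl pyBFirstStep s) := by
  induction l with
  | nil => intro pos s h; exact h
  | cons x t ih =>
    intro pos s h
    exact ih _ _ (INVpc_step pos s x h)

lemma INVpc_fold (rows : List (List (Option String))) :
    ∀ pos s, INVpc pos s → INVpc (rows.foldl rowP pos) (rows.foldl rowB s) := by
  induction rows with
  | nil => intro pos s h; exact h
  | cons r t ih =>
    intro pos s h
    exact ih _ _ (INVpc_fold_inner _ pos s h)

lemma INVpc_empty : INVpc PySem.Dict.empty (PySem.Dict.empty, PySem.Set.empty) := by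
  refine ⟨rfl, PySem.Dict.nodup_keys_empty, ?_, ?_⟩
  · intro n st hst
    rw [PySem.Dict.get?_empty] at hst
    cases hst
  · intro n
    constructor
    · intro h; cases h
    · rintro ⟨st, hst, _⟩
      rw [PySem.Dict.get?_empty] at hst
      cases hst

lemma consistent_eq (pos : PySem.Dict String (PySem.Set Int))
    (s : PySem.Dict String Int × PySem.Set String) (h : INVpc pos s) :
    pos.items.foldl
      (fun d kv => if kv.2.length == 1 then d.insert kv.1 (kv.2.headD 0) else d) PySem.Dict.empty
    = s.1.items.foldl
      (fun d kv => if s.2.contains kv.1 then d else d.insert kv.1 kv.2) PySem.Dict.empty := by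
  obtain ⟨hkeys, hnd, hget, hinc⟩ := h
  have hnd' : s.1.keys.Nodup := hkeys ▸ hnd
  rw [PySem.Dict.items_eq_map_keys pos hnd PySem.Set.empty,
      PySem.Dict.items_eq_map_keys s.1 hnd' 0, ← hkeys]
  rw [List.foldl_map, List.foldl_map]
  apply PySem.List.foldl_congr_mem
  intro acc k hkmem
  obtain ⟨st, hst⟩ : ∃ st, pos.get? k = some st := by
    cases hg : pos.get? k with
    | none => exact absurd ((PySem.Dict.get?_eq_none_iff_not_mem_keys pos k).mp hg) (by simpa using hkmem)
    | some st => exact ⟨st, rfl⟩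
  obtain ⟨hne, hsnd, hfp⟩ := hget k st hst
  have hgd : pos.getD k PySem.Set.empty = st := PySem.Dict.getD_of_get?_eq_some pos _ hst
  have hgd' : s.1.getD k 0 = st.headD 0 := PySem.Dict.getD_of_get?_eq_some s.1 _ hfp
  rw [hgd, hgd']
  by_cases h2 : 2 ≤ st.length
  · have hcont : PySem.Set.contains s.2 k = true := by
      rw [show (PySem.Set.contains s.2 k = List.contains s.2 k) from rfl]
      rw [List.contains_iff_mem]
      exact (hinc k).mpr ⟨st, hst, h2⟩
    rw [if_pos hcont, if_neg (by
      simp only [beq_iff_eq]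
      omega)]
  · have hlen1 : st.length = 1 := by
      have : st.length ≠ 0 := by simpa [List.length_eq_zero_iff] using hne
      omega
    have hnotmem : k ∉ s.2 := by
      intro hmem
      obtain ⟨st', hst', hl⟩ := (hinc k).mp hmem
      rw [hst] at hst'; cases hst'
      omega
    rw [if_pos (show (st.length == 1) = true by simp [hlen1]),
        if_neg (show ¬ (PySem.Set.contains s.2 k = true) by
          rw [show (PySem.Set.contains s.2 k = List.contains s.2 k) from rfl, List.contains_iff_mem]
          exact hnotmem)]
def names (row : List (Option String)) : List String := row.filterMap id
def flatNames (rows : List (List (Option String))) : List String := rows.flatMap names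
def maxCount (rows : List (List (Option String))) (n : String) : Int :=
  (rows.map (fun r => (r.count (some n) : Int))).foldl max 0

lemma tc_eq (row : List (Option String)) :
    ∀ (n : Int) (d : PySem.Dict String Int),
      (PySem.List.enumerate row n).foldl stepTC d =
        (names row).foldl (fun d nm => d.modify nm 0 (· + 1)) d := by
  induction row with
  | nil => intro n d; rfl
  | cons x t ih =>
    intro n d
    cases x with
    | none =>
      rw [show PySem.List.enumerate (none :: t) n = (n, (none : Option String)) :: PySem.List.enumerate t (n + 1) from rfl]
      rw [List.foldl_cons, show stepTC d (n, none) = d from rfl, ih]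
      rfl
    | some nm =>
      rw [show PySem.List.enumerate (some nm :: t) n = (n, some nm) :: PySem.List.enumerate t (n + 1) from rfl]
      rw [List.foldl_cons, show stepTC d (n, some nm) = d.modify nm 0 (· + 1) from rfl, ih]
      rfl

lemma mergeList (xs : List String) :
    ∀ (ks : List String) (m : PySem.Dict String Int), ks.Nodup → (∀ k ∈ ks, k ∈ xs) →
      m.keys.Nodup →
      ((ks.foldl (fun m k => if ((xs.count k : Int)) > m.getD k 0 then m.insert k (xs.count k) else m) m).keys
          = PySem.Set.update m.keys ks ∧
        (ks.foldl (fun m k => if ((xs.count k : Int)) > m.getD k 0 then m.insert k (xs.count k) else m) m).keys.Nodup ∧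
        ∀ n, (ks.foldl (fun m k => if ((xs.count k : Int)) > m.getD k 0 then m.insert k (xs.count k) else m) m).getD n 0
          = if n ∈ ks then max (m.getD n 0) (xs.count n) else m.getD n 0) := by
  intro ks
  induction ks with
  | nil =>
    intro m _ _ hmnd
    exact ⟨rfl, hmnd, fun n => by simp⟩
  | cons k ks ih =>
    intro m hnd hmem hmnd
    have hkxs : k ∈ xs := hmem k (List.mem_cons_self)
    have hcpos : (0 : Int) < xs.count k := by
      have := List.count_pos_iff.mpr hkxs
      exact_mod_cast this
    -- the state after the first step
    set m' := if ((xs.count k : Int)) > m.getD k 0 then m.insert k (xs.count k) else m with hm'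
    have hkeys' : m'.keys = PySem.Set.add m.keys k := by
      rw [hm']
      by_cases hc : m.contains k = true
      · have hmemk : k ∈ m.keys := (PySem.Dict.contains_iff_mem_keys m k).mp hc
        have : PySem.Set.add m.keys k = m.keys := by
          simp only [PySem.Set.add]
          rw [if_pos (by rw [show (PySem.Set.contains m.keys k = List.contains m.keys k) from rfl, List.contains_iff_mem]; exact hmemk)]
        rw [this]
        split_ifs
        · exact PySem.Dict.keys_insert_of_contains m _ hc
        · rfl
      · have hcf : m.contains k = false := by simpa using hc
        have hgd0 : m.getD k 0 = 0 := PySem.Dict.getD_of_not_contains m 0 hcf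
        rw [if_pos (by rw [hgd0]; exact hcpos)]
        rw [PySem.Dict.keys_insert_of_not_contains m _ hcf]
        have hmemk : k ∉ m.keys := by
          intro hk; exact absurd ((PySem.Dict.contains_iff_mem_keys m k).mpr hk) (by simp [hcf])
        simp only [PySem.Set.add]
        rw [if_neg (by rw [show (PySem.Set.contains m.keys k = List.contains m.keys k) from rfl, List.contains_iff_mem]; exact hmemk)]
    have hnd' : m'.keys.Nodup := by
      rw [hm']
      split_ifs with hc
      · by_cases hck : m.contains k = true
        · rw [PySem.Dict.keys_insert_of_contains m _ hck]; exact hmnd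
        · rw [PySem.Dict.keys_insert_of_not_contains m _ (by simpa using hck)]
          refine List.Nodup.append hmnd (List.nodup_singleton k) ?_
          intro a ha hb
          simp only [List.mem_singleton] at hb
          subst hb
          exact absurd ((PySem.Dict.contains_iff_mem_keys m a).mpr ha) (by simpa using hck)
      · exact hmnd
    have hgd' : ∀ n, m'.getD n 0 = if n = k then max (m.getD n 0) (xs.count n) else m.getD n 0 := by
      intro n
      rw [hm']
      split_ifs with hc hn hn
      · subst hn
        rw [PySem.Dict.getD_insert, if_pos rfl]
        omega
      · rw [PySem.Dict.getD_insert, if_neg hn]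
      · subst hn
        omega
      · rfl
    obtain ⟨ihk, ihnd, ihgd⟩ := ih m' (by exact hnd.of_cons) (fun a ha => hmem a (List.mem_cons_of_mem _ ha)) hnd'
    refine ⟨?_, ihnd, ?_⟩
    · rw [List.foldl_cons, ← hm', ihk, hkeys']
      rfl
    · intro n
      rw [List.foldl_cons, ← hm', ihgd n]
      by_cases hn : n = k
      · subst hn
        have hnks : n ∉ ks := (List.nodup_cons.mp hnd).1
        rw [if_neg hnks, if_pos List.mem_cons_self, hgd' n, if_pos rfl]
      · by_cases hnk : n ∈ ks
        · rw [if_pos hnk, if_pos (List.mem_cons_of_mem _ hnk), hgd' n, if_neg hn]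
        · rw [if_neg hnk, if_neg (by simp [hn, hnk]), hgd' n, if_neg hn]
lemma set_add_of_mem {s : PySem.Set String} {x : String} (h : x ∈ s) :
    PySem.Set.add s x = s := by
  simp only [PySem.Set.add]
  rw [if_pos (by rw [show (PySem.Set.contains s x = List.contains s x) from rfl, List.contains_iff_mem]; exact h)]

lemma mem_set_update {x : String} : ∀ (xs : List String) (s : PySem.Set String), x ∈ s → x ∈ PySem.Set.update s xs := by
  intro xs
  induction xs with
  | nil => intro s h; exact h
  | cons y ys ih =>
    intro s h
    rw [show PySem.Set.update s (y :: ys) = PySem.Set.update (PySem.Set.add s y) ys from rfl]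
    exact ih (PySem.Set.add s y) ((PySem.Set.mem_add s y x).mpr (Or.inl h))

lemma mem_set_update_of_mem_list {x : String} : ∀ (xs : List String) (s : PySem.Set String),
    x ∈ xs → x ∈ PySem.Set.update s xs := by
  intro xs
  induction xs with
  | nil => intro s h; cases h
  | cons y ys ih =>
    intro s h
    rw [show PySem.Set.update s (y :: ys) = PySem.Set.update (PySem.Set.add s y) ys from rfl]
    rcases List.mem_cons.mp h with rfl | h
    · exact mem_set_update ys _ ((PySem.Set.mem_add s x x).mpr (Or.inr rfl))
    · exact ih _ h

lemma set_update_add (x : String) : ∀ (s t : PySem.Set String),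
    PySem.Set.update s (PySem.Set.add t x) = PySem.Set.add (PySem.Set.update s t) x := by
  intro s t
  by_cases hx : x ∈ t
  · rw [set_add_of_mem hx, set_add_of_mem (mem_set_update_of_mem_list t s hx)]
  · have : PySem.Set.add t x = t ++ [x] := by
      simp only [PySem.Set.add]
      rw [if_neg (by rw [show (PySem.Set.contains t x = List.contains t x) from rfl, List.contains_iff_mem]; exact hx)]
    rw [this]
    show List.foldl PySem.Set.add s (t ++ [x]) = _
    rw [List.foldl_append]
    rfl

lemma set_update_update (xs : List String) :
    ∀ (s t : PySem.Set String), PySem.Set.update s (PySem.Set.update t xs)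
      = PySem.Set.update (PySem.Set.update s t) xs := by
  induction xs with
  | nil => intro s t; rfl
  | cons x xs ih =>
    intro s t
    rw [show PySem.Set.update t (x :: xs) = PySem.Set.update (PySem.Set.add t x) xs from rfl]
    rw [ih s (PySem.Set.add t x), set_update_add]
    rfl

lemma set_update_ofList (xs : List String) (s : PySem.Set String) :
    PySem.Set.update s (PySem.Set.ofList xs) = PySem.Set.update s xs := by
  rw [show PySem.Set.ofList xs = PySem.Set.update PySem.Set.empty xs from rfl]
  rw [set_update_update]
  rfl

lemma count_names (r : List (Option String)) (n : String) :
    (names r).count n = r.count (some n) := by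
  induction r with
  | nil => rfl
  | cons x t ih =>
    cases x with
    | none =>
      rw [show names (none :: t) = names t from rfl]
      rw [List.count_cons]
      simp [ih]
    | some a =>
      rw [show names (some a :: t) = a :: names t from rfl]
      rw [List.count_cons, List.count_cons, ih]
      simp

lemma maxCount_nonneg (rows : List (List (Option String))) (n : String) :
    0 ≤ maxCount rows n := by
  unfold maxCount
  exact (PySem.List.le_foldl_max (rows.map (fun r => (r.count (some n) : Int))) 0).1

lemma mem_names_iff (r : List (Option String)) (n : String) :
    n ∈ names r ↔ some n ∈ r := by
  simp only [names, List.mem_filterMap, id]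
  constructor
  · rintro ⟨x, hx, rfl⟩; exact hx
  · intro h; exact ⟨some n, h, rfl⟩

lemma rowM_facts (m : PySem.Dict String Int) (row : List (Option String))
    (hnd : m.keys.Nodup) :
    (rowM m row).keys = PySem.Set.update m.keys (names row) ∧
    (rowM m row).keys.Nodup ∧
    ∀ n, (rowM m row).getD n 0 =
      if n ∈ names row then max (m.getD n 0) ((names row).count n) else m.getD n 0 := by
  have htc : (PySem.List.enumerate row).foldl stepTC PySem.Dict.empty
      = PySem.Dict.counter (names row) := by
    rw [PySem.Dict.counter_eq_foldl]
    exact tc_eq row 0 PySem.Dict.empty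
  unfold rowM
  rw [htc, PySem.Dict.items_counter, List.foldl_map]
  obtain ⟨h1, h2, h3⟩ := mergeList (names row) (PySem.Set.ofList (names row)) m
    (PySem.Set.nodup_ofList _) (fun k hk => (PySem.Set.mem_ofList _ k).mp hk) hnd
  refine ⟨?_, ?_, ?_⟩
  · rw [h1, set_update_ofList]
  · exact h2
  · intro n
    rw [h3 n]
    by_cases hmem : n ∈ names row
    · rw [if_pos ((PySem.Set.mem_ofList _ n).mpr hmem), if_pos hmem]
    · rw [if_neg (fun h => hmem ((PySem.Set.mem_ofList _ n).mp h)), if_neg hmem]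
lemma flatNames_append (rs : List (List (Option String))) (r : List (Option String)) :
    flatNames (rs ++ [r]) = flatNames rs ++ names r := by
  unfold flatNames
  rw [List.flatMap_append]
  simp

lemma ofList_append (xs ys : List String) :
    PySem.Set.ofList (xs ++ ys) = PySem.Set.update (PySem.Set.ofList xs) ys := by
  rw [PySem.Set.ofList_eq_foldl, List.foldl_append]
  rfl

lemma maxCount_append (rs : List (List (Option String))) (r : List (Option String)) (n : String) :
    maxCount (rs ++ [r]) n = max (maxCount rs n) (r.count (some n)) := by
  unfold maxCount
  rw [List.map_append, List.foldl_append]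
  rfl

lemma max_main (rows : List (List (Option String))) :
    (rows.foldl rowM PySem.Dict.empty).keys = PySem.Set.ofList (flatNames rows) ∧
    (rows.foldl rowM PySem.Dict.empty).keys.Nodup ∧
    ∀ n, (rows.foldl rowM PySem.Dict.empty).getD n 0 = maxCount rows n := by
  induction rows using List.reverseRecOn with
  | nil =>
    refine ⟨rfl, PySem.Dict.nodup_keys_empty, fun n => ?_⟩
    rw [List.foldl_nil, PySem.Dict.getD_empty]
    rfl
  | append_singleton rs r ih =>
    obtain ⟨ihk, ihnd, ihgd⟩ := ih
    rw [List.foldl_append, List.foldl_cons, List.foldl_nil]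
    obtain ⟨h1, h2, h3⟩ := rowM_facts (rs.foldl rowM PySem.Dict.empty) r ihnd
    refine ⟨?_, h2, ?_⟩
    · rw [h1, ihk, flatNames_append, ofList_append]
    · intro n
      rw [h3 n, maxCount_append, ihgd n]
      by_cases hmem : n ∈ names r
      · rw [if_pos hmem, count_names]
      · rw [if_neg hmem]
        have hc0 : r.count (some n) = 0 := by
          rw [List.count_eq_zero]
          intro hmemr
          exact hmem ((mem_names_iff r n).mpr hmemr)
        rw [hc0]
        have := maxCount_nonneg rs n
        push_cast
        omega
def rowC (d : PySem.Dict String (List Int)) (row : List (Option String)) :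
    PySem.Dict String (List Int) :=
  (PySem.Dict.counter (row.filterMap id)).items.foldl
    (fun d kv => d.modify kv.1 [] (fun l => l ++ [kv.2])) d

def cnts (rows : List (List (Option String))) (n : String) : List Int :=
  (rows.filter (fun r => decide (n ∈ names r))).map (fun r => (((names r).count n : Int)))

lemma filter_map_nodup (n : String) (g : String → Int) :
    ∀ (ks : List String), ks.Nodup →
      ((ks.map (fun k => (k, g k))).filter (fun p => p.1 == n))
        = if n ∈ ks then [(n, g n)] else [] := by
  intro ks
  induction ks with
  | nil => intro _; rfl
  | cons k t ih =>
    intro hnd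
    rw [List.map_cons, List.filter_cons]
    by_cases hk : k = n
    · subst hk
      have hnt : k ∉ t := (List.nodup_cons.mp hnd).1
      rw [if_pos (by simp), ih (List.nodup_cons.mp hnd).2, if_neg hnt,
          if_pos List.mem_cons_self]
    · rw [if_neg (by simpa using hk), ih (List.nodup_cons.mp hnd).2]
      by_cases hnt : n ∈ t
      · rw [if_pos hnt, if_pos (List.mem_cons_of_mem _ hnt)]
      · rw [if_neg hnt, if_neg (by
          intro hmem
          rcases List.mem_cons.mp hmem with h | h
          · exact hk h.symm
          · exact hnt h)]

lemma rowC_facts (d : PySem.Dict String (List Int)) (row : List (Option String))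
    (hnd : d.keys.Nodup) :
    (rowC d row).keys = PySem.Set.update d.keys (names row) ∧
    (rowC d row).keys.Nodup ∧
    ∀ n, (rowC d row).getD n [] = d.getD n [] ++
      (if n ∈ names row then [(((names row).count n : Int))] else []) := by
  unfold rowC
  rw [show row.filterMap id = names row from rfl, PySem.Dict.items_counter]
  refine ⟨?_, ?_, ?_⟩
  · rw [PySem.Dict.keys_foldl_modify_key _ Prod.fst [] (fun _ kv => (fun l => l ++ [kv.2])) d]
    rw [List.map_map]
    rw [show ((fun (p : String × Int) => p.1) ∘ fun k => (k, ((names row).count k : Int)))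
        = fun k => k from rfl]
    rw [List.map_id', set_update_ofList]
  · exact PySem.Dict.nodup_keys_foldl_modify_key _ Prod.fst [] _ d hnd
  · intro n
    rw [PySem.Dict.getD_foldl_modify_append]
    rw [filter_map_nodup n _ _ (PySem.Set.nodup_ofList _)]
    by_cases hmem : n ∈ names row
    · rw [if_pos ((PySem.Set.mem_ofList _ n).mpr hmem), if_pos hmem]
      rfl
    · rw [if_neg (fun h => hmem ((PySem.Set.mem_ofList _ n).mp h)), if_neg hmem]
      rfl

lemma cnts_append (rs : List (List (Option String))) (r : List (Option String)) (n : String) :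
    cnts (rs ++ [r]) n = cnts rs n ++
      (if n ∈ names r then [(((names r).count n : Int))] else []) := by
  unfold cnts
  rw [List.filter_append, List.map_append]
  by_cases hmem : n ∈ names r
  · rw [if_pos hmem]
    rw [show List.filter (fun r' => decide (n ∈ names r')) [r] = [r] from by
      simp [hmem]]
    rfl
  · rw [if_neg hmem]
    rw [show List.filter (fun r' => decide (n ∈ names r')) [r] = [] from by
      simp [hmem]]
    simp

lemma cbn_facts (rows : List (List (Option String))) :
    (rows.foldl rowC PySem.Dict.empty).keys = PySem.Set.ofList (flatNames rows) ∧
    (rows.foldl rowC PySem.Dict.empty).keys.Nodup ∧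
    ∀ n, (rows.foldl rowC PySem.Dict.empty).getD n [] = cnts rows n := by
  induction rows using List.reverseRecOn with
  | nil =>
    refine ⟨rfl, PySem.Dict.nodup_keys_empty, fun n => ?_⟩
    rw [List.foldl_nil, PySem.Dict.getD_empty]
    rfl
  | append_singleton rs r ih =>
    obtain ⟨ihk, ihnd, ihgd⟩ := ih
    rw [List.foldl_append, List.foldl_cons, List.foldl_nil]
    obtain ⟨h1, h2, h3⟩ := rowC_facts (rs.foldl rowC PySem.Dict.empty) r ihnd
    refine ⟨?_, h2, ?_⟩
    · rw [h1, ihk, flatNames_append, ofList_append]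
    · intro n
      rw [h3 n, ihgd n, cnts_append]

lemma max?_getD_nonneg (l : List Int) (h : ∀ x ∈ l, 0 ≤ x) :
    (PySem.List.max? l (fun x => x)).getD 0 = l.foldl max 0 := by
  cases l with
  | nil => rfl
  | cons x t =>
    rw [PySem.List.max?_id_cons, Option.getD_some, List.foldl_cons,
        max_eq_right (h x List.mem_cons_self)]

lemma cnts_foldl_max (rows : List (List (Option String))) (n : String) :
    (cnts rows n).foldl max 0 = maxCount rows n := by
  induction rows using List.reverseRecOn with
  | nil => rfl
  | append_singleton rs r ih =>
    rw [cnts_append, maxCount_append, List.foldl_append, ih]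
    by_cases hmem : n ∈ names r
    · rw [if_pos hmem, List.foldl_cons, List.foldl_nil, count_names]
    · rw [if_neg hmem, List.foldl_nil]
      have hc0 : r.count (some n) = 0 := by
        rw [List.count_eq_zero]
        intro hmemr
        exact hmem ((mem_names_iff r n).mpr hmemr)
      rw [hc0]
      have := maxCount_nonneg rs n
      push_cast
      omega

lemma cnts_nonneg (rows : List (List (Option String))) (n : String) :
    ∀ x ∈ cnts rows n, 0 ≤ x := by
  intro x hx
  unfold cnts at hx
  obtain ⟨r, _, rfl⟩ := List.mem_map.mp hx
  positivity

lemma main_eq (rows : List (List (Option String))) :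
    analyze_body_names_py rows = analyze_body_names_py_alt rows := by
  have hfoldB : rows.foldl (fun s row => (PySem.List.enumerate row).foldl pyBFirstStep s)
      (PySem.Dict.empty, PySem.Set.empty) = rows.foldl rowB (PySem.Dict.empty, PySem.Set.empty) := rfl
  have hinit : (rows.headD []).map (fun _ => (PySem.Dict.empty : PySem.Dict String Int))
      = List.replicate (rows.headD []).length PySem.Dict.empty := List.map_const'
  have hinv : INVpc (rows.foldl rowP PySem.Dict.empty) (rows.foldl rowB (PySem.Dict.empty, PySem.Set.empty)) :=
    INVpc_fold rows PySem.Dict.empty (PySem.Dict.empty, PySem.Set.empty) INVpc_empty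
  obtain ⟨hMk, hMnd, hMgd⟩ := max_main rows
  simp only [analyze_body_names_py, analyze_body_names_py_alt]
  rw [hfoldB, hinit, outer_split]
  simp only [Prod.mk.injEq]
  refine ⟨?_, ?_, ?_⟩
  · rw [freq_main]
  · exact congrArg PySem.Dict.items (consistent_eq _ _ hinv)
  · -- max occurrences
    set M := rows.foldl rowM PySem.Dict.empty with hM
    have hfoldC : rows.foldl
        (fun d row => (PySem.Dict.counter (row.filterMap id)).items.foldl
          (fun d kv => d.modify kv.1 [] (fun l => l ++ [kv.2])) d)
        PySem.Dict.empty = rows.foldl rowC PySem.Dict.empty := rfl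
    rw [hfoldC]
    obtain ⟨hCk, hCnd, hCgd⟩ := cbn_facts rows
    have hfresh := PySem.Dict.items_foldl_insert_fresh
      ((rows.foldl rowC PySem.Dict.empty).items)
      Prod.fst
      (fun kv => ((PySem.List.max? kv.2 (fun x => x)).getD 0))
      PySem.Dict.empty
      (fun a _ => PySem.Dict.contains_empty _)
      (by rw [show ((rows.foldl rowC PySem.Dict.empty).items.map Prod.fst)
              = (rows.foldl rowC PySem.Dict.empty).keys from rfl]
          exact hCnd)
    rw [hfresh]
    rw [PySem.Dict.items_eq_map_keys M hMnd 0, hMk]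
    rw [PySem.Dict.items_eq_map_keys _ hCnd [], hCk]
    rw [show (PySem.Dict.empty : PySem.Dict String Int).items = [] from rfl, List.nil_append]
    rw [List.map_map]
    apply List.map_congr_left
    intro k _
    simp only [Function.comp]
    rw [hMgd k, hCgd k, max?_getD_nonneg _ (cnts_nonneg rows k), cnts_foldl_max]

-- ===== VERDICT (by name: the statement is the Claim_ definition above) =====
theorem analyze_body_names_py_spec : Claim_equal_analyze_body_names_py := by
  intro same_length_tuples _ _
  exact main_eq same_length_tuples
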